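-- pv_equiv track=rewrite | github.com/twlab/methylGrapher | src/longread.py | cs_tag_to_cigar
-- ===== SOURCE A (Python) =====
-- def cs_tag_to_cigar(alignment_tag):
--     tag_parsed = []
--
--     element = ""
--     for s in alignment_tag:
--         if s in "+-:*":
--             if len(element) == 0 and len(tag_parsed) == 0:
--                 element = s
--                 continue
--             tag_parsed.append(element)
--             element = s
--             continue
--         element += s
--
--     tag_parsed.append(element)
--     tag_reconstructed = "".join(tag_parsed)
--     assert tag_reconstructed == alignment_tag
--
--     res = []
--     for t in tag_parsed:
--         if t[0] == "+":
--             res.append((len(t[1:]), "I"))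
--         elif t[0] == "-":
--             res.append((len(t[1:]), "D"))
--         elif t[0] == ":":
--             res.append((int(t[1:]), "M"))
--         elif t[0] == "*":
--             # Mismatch
--             res.append((1, "M"))
--         else:
--             raise RuntimeError(f"Unknown cigar type {t}")
--
--
--     return res
-- ===== SOURCE B (Python) =====
-- def cs_tag_to_cigar(alignment_tag):
--     # Single pass: emit each CIGAR op directly while scanning, no token list / join / assert.
--     res = []
--     i = 0
--     n = len(alignment_tag)
--     while i < n:
--         op = alignment_tag[i]
--         j = i + 1
--         while j < n and alignment_tag[j] not in "+-:*":
--             j += 1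
--         body = alignment_tag[i + 1:j]
--         if op == "+":
--             res.append((len(body), "I"))
--         elif op == "-":
--             res.append((len(body), "D"))
--         elif op == ":":
--             res.append((int(body), "M"))
--         elif op == "*":
--             res.append((1, "M"))
--         else:
--             raise RuntimeError(f"Unknown cigar type {op}{body}")
--         i = j
--     return res
-- ===== Notes on version B (the rewrite author's own statement) =====
-- stated objective: simpler
-- what changed: B emits each CIGAR pair directly in a single scan (index i jumps from delimiter to delimiter, slicing the body), instead of A's three passes: build a token list char-by-char, join-and-assert reconstruction, then map tokens to pairs.
-- crash fix: On the empty tag A raises IndexError (its single token '' has no first char) while B returns [], the natural empty operation list. — e.g. on cs_tag_to_cigar(""): A raises IndexError, B returns []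
import Mathlib
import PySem

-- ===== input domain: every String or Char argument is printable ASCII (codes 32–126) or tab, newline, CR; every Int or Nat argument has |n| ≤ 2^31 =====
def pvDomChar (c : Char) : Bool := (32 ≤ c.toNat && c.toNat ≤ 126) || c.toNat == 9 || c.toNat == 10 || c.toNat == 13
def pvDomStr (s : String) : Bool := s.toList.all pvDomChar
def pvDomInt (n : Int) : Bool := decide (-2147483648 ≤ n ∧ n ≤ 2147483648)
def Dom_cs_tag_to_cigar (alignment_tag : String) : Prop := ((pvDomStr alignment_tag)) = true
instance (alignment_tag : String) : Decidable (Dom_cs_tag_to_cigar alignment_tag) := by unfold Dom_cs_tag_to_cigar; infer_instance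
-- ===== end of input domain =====

-- B replaces A's three passes (tokenise char-by-char, join+assert, map) by a single scan that
-- emits each CIGAR pair directly; same return value wherever A returns.

-- s in "+-:*"
def pvDelim (c : Char) : Bool := c == '+' || c == '-' || c == ':' || c == '*'

-- ===== PORT A =====
-- first loop of A: builds tag_parsed (state: tag_parsed, element)
def csA_parse : List Char → List (List Char) → List Char → List (List Char)
  | [], tp, el => tp ++ [el]
  | s :: rest, tp, el =>
    if pvDelim s then
      if el.length == 0 && tp.length == 0 then csA_parse rest tp [s]
      else csA_parse rest (tp ++ [el]) [s]
    else csA_parse rest tp (el ++ [s])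

-- body of A's second loop: t[0]/t[1:] dispatch; none = the raise (IndexError on [],
-- ValueError from int, RuntimeError on an unknown first char) — all excluded by Pre_
def csA_emit : List Char → Option (Int × String)
  | [] => none
  | c :: b =>
    if c == '+' then some ((b.length : Int), "I")
    else if c == '-' then some ((b.length : Int), "D")
    else if c == ':' then (PySem.Int.ofChars? b).map (fun n => (n, "M"))
    else if c == '*' then some (1, "M")
    else none

-- A's second loop: res accumulation, aborted by the first raise
def csA_res : List (List Char) → Option (List (Int × String))
  | [] => some []
  | t :: ts =>
    match csA_emit t with
    | none => none
    | some p => (csA_res ts).map (fun l => p :: l)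

def cs_tag_to_cigar (alignment_tag : String) : List (Int × String) :=
  let tp := csA_parse alignment_tag.toList [] []
  -- assert tag_reconstructed == alignment_tag; the else branch is unreachable (lemma csA_parse_flatten below)
  if tp.flatten = alignment_tag.toList then (csA_res tp).getD [] else []

-- ===== PORT B =====
-- dispatch on op/body of Source B's loop body; none = the raise (excluded by Pre_)
def csB_emit (op : Char) (body : List Char) : Option (Int × String) :=
  if op == '+' then some ((body.length : Int), "I")
  else if op == '-' then some ((body.length : Int), "D")
  else if op == ':' then (PySem.Int.ofChars? body).map (fun n => (n, "M"))
  else if op == '*' then some (1, "M")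
  else none

-- Source B's outer while loop: op = tag[i]; inner while advances j past the body (takeWhile/dropWhile);
-- emit, then continue at the next delimiter
def csB_go (op : Char) (cs : List Char) : Option (List (Int × String)) :=
  match hmh : cs.dropWhile (fun c => !pvDelim c) with
  | [] => (csB_emit op (cs.takeWhile (fun c => !pvDelim c))).map (fun p => [p])
  | o :: r =>
    match csB_emit op (cs.takeWhile (fun c => !pvDelim c)) with
    | none => none
    | some p => (csB_go o r).map (fun l => p :: l)
termination_by cs.length
decreasing_by
  have := List.length_dropWhile_le (p := fun c => !pvDelim c) (l := cs)
  rw [hmh] at this; simp at this; omega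

def cs_tag_to_cigar_alt (alignment_tag : String) : List (Int × String) :=
  match alignment_tag.toList with
  | [] => []
  | op :: rest => (csB_go op rest).getD []

-- ===== PRECONDITION & SPEC =====
-- Pre_ = exactly where Python A returns: nonempty tag, first char a delimiter (else RuntimeError;
-- empty gives IndexError), and the run after every colon delimiter int-parsable (else ValueError).
def Pre_cs_tag_to_cigar (alignment_tag : String) : Prop :=
  alignment_tag.toList ≠ [] ∧
  pvDelim (alignment_tag.toList.headD ' ') = true ∧
  ∀ i < alignment_tag.toList.length, alignment_tag.toList[i]? = some ':' →
    (PySem.Int.ofChars? ((alignment_tag.toList.drop (i + 1)).takeWhile (fun c => !pvDelim c))).isSome = true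
instance (alignment_tag : String) : Decidable (Pre_cs_tag_to_cigar alignment_tag) := by
  unfold Pre_cs_tag_to_cigar; infer_instance

def pvWitness_cs_tag_to_cigar : String := ":12+ac-gt*a:3"

-- On the empty tag A raises IndexError (its single token '' has no first char) while B returns [].
def Raises_cs_tag_to_cigar (alignment_tag : String) : Prop := alignment_tag = ""
instance (alignment_tag : String) : Decidable (Raises_cs_tag_to_cigar alignment_tag) := by
  unfold Raises_cs_tag_to_cigar; infer_instance
def pvRaiseWitness_cs_tag_to_cigar : String := ""
def pvRaiseWitnessOut_cs_tag_to_cigar : List (Int × String) := []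

def Spec_cs_tag_to_cigar (alignment_tag : String) (out : List (Int × String)) : Prop :=
  out = cs_tag_to_cigar_alt alignment_tag
instance (alignment_tag : String) (out : List (Int × String)) : Decidable (Spec_cs_tag_to_cigar alignment_tag out) := by
  unfold Spec_cs_tag_to_cigar; infer_instance

-- ===== CLAIM (what is proved, stated in full; the proofs are below) =====
def Claim_equal_cs_tag_to_cigar : Prop := ∀ (alignment_tag : String), Dom_cs_tag_to_cigar alignment_tag → Pre_cs_tag_to_cigar alignment_tag → Spec_cs_tag_to_cigar alignment_tag (cs_tag_to_cigar alignment_tag)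

def Claim_raises_cs_tag_to_cigar : Prop := (∀ (alignment_tag : String), Dom_cs_tag_to_cigar alignment_tag → Raises_cs_tag_to_cigar alignment_tag → ¬ Pre_cs_tag_to_cigar alignment_tag) ∧ (Dom_cs_tag_to_cigar (pvRaiseWitness_cs_tag_to_cigar) ∧ Raises_cs_tag_to_cigar (pvRaiseWitness_cs_tag_to_cigar) ∧ cs_tag_to_cigar_alt (pvRaiseWitness_cs_tag_to_cigar) = pvRaiseWitnessOut_cs_tag_to_cigar)

-- ===== LEMMAS AND PROOFS =====

-- the tokens are the original characters in order (A's assert never fails)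
lemma csA_parse_flatten (cs : List Char) (tp : List (List Char)) (el : List Char) :
    (csA_parse cs tp el).flatten = tp.flatten ++ el ++ cs := by
  induction cs generalizing tp el with
  | nil => simp [csA_parse]
  | cons s rest ih =>
    unfold csA_parse
    split_ifs with h1 h2
    · have hel : el = [] := by
        cases el with
        | nil => rfl
        | cons a b => simp at h2
      simp [ih, hel]
    · simp [ih]
    · simp [ih]

-- proof-side characterisation of the token split (mirror recursion on the delimiter positions)
def tokensOf (el : List Char) (cs : List Char) : List (List Char) :=
  match hmh : cs.dropWhile (fun c => !pvDelim c) with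
  | [] => [el ++ cs.takeWhile (fun c => !pvDelim c)]
  | d :: r => (el ++ cs.takeWhile (fun c => !pvDelim c)) :: tokensOf [d] r
termination_by cs.length
decreasing_by
  have := List.length_dropWhile_le (p := fun c => !pvDelim c) (l := cs)
  rw [hmh] at this; simp at this; omega

lemma tokensOf_cons_delim (el : List Char) (s : Char) (rest : List Char)
    (hs : pvDelim s = true) : tokensOf el (s :: rest) = el :: tokensOf [s] rest := by
  rw [tokensOf]
  have hd : List.dropWhile (fun c => !pvDelim c) (s :: rest) = s :: rest := by simp [hs]
  have ht : List.takeWhile (fun c => !pvDelim c) (s :: rest) = [] := by simp [hs]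
  split <;> simp_all

lemma tokensOf_cons_nondelim (el : List Char) (s : Char) (rest : List Char)
    (hs : pvDelim s = false) : tokensOf el (s :: rest) = tokensOf (el ++ [s]) rest := by
  rw [tokensOf, tokensOf]
  have hd : List.dropWhile (fun c => !pvDelim c) (s :: rest)
      = List.dropWhile (fun c => !pvDelim c) rest := by simp [hs]
  have ht : List.takeWhile (fun c => !pvDelim c) (s :: rest)
      = s :: List.takeWhile (fun c => !pvDelim c) rest := by simp [hs]
  split <;> split <;> simp_all

lemma csA_parse_eq_tokensOf (cs : List Char) (tp : List (List Char)) (el : List Char)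
    (hel : el ≠ []) : csA_parse cs tp el = tp ++ tokensOf el cs := by
  induction cs generalizing tp el with
  | nil =>
    rw [tokensOf]
    simp [csA_parse]
  | cons s rest ih =>
    unfold csA_parse
    by_cases hs : pvDelim s
    · have h2 : (el.length == 0 && tp.length == 0) = false := by
        cases el with
        | nil => exact absurd rfl hel
        | cons a b => simp
      rw [if_pos hs, h2, if_neg (by simp)]
      rw [ih (tp ++ [el]) [s] (by simp)]
      rw [tokensOf_cons_delim el s rest hs]
      simp
    · rw [if_neg hs]
      rw [ih tp (el ++ [s]) (by simp)]
      rw [tokensOf_cons_nondelim el s rest (by simpa using hs)]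

lemma csA_emit_cons (c : Char) (b : List Char) : csA_emit (c :: b) = csB_emit c b := rfl

-- A's mapping pass over the token split equals B's direct emission scan
lemma csA_res_tokensOf (cs : List Char) (op : Char) :
    csA_res (tokensOf [op] cs) = csB_go op cs := by
  induction hn : cs.length using Nat.strong_induction_on generalizing cs op with
  | _ n ih =>
    rw [tokensOf, csB_go]
    split
    · simp only [csA_res, List.singleton_append, csA_emit_cons]
      cases csB_emit op (cs.takeWhile (fun c => !pvDelim c)) <;> simp
    · rename_i d r heq1
      have hlen : r.length < n := by
        have := List.length_dropWhile_le (p := fun c => !pvDelim c) (l := cs)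
        rw [heq1] at this; simp at this; omega
      simp only [csA_res, List.singleton_append, csA_emit_cons]
      cases csB_emit op (cs.takeWhile (fun c => !pvDelim c)) with
      | none => rfl
      | some p => rw [ih r.length hlen r d rfl]

-- ===== VERDICT (by name: the statement is the Claim_ definition above) =====
theorem cs_tag_to_cigar_spec : Claim_equal_cs_tag_to_cigar := by
  intro tag _ hpre
  obtain ⟨hne, hd, -⟩ := hpre
  unfold Spec_cs_tag_to_cigar cs_tag_to_cigar cs_tag_to_cigar_alt
  cases hcs : tag.toList with
  | nil => exact absurd hcs hne
  | cons d rest =>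
    have hstep : csA_parse (d :: rest) [] [] = csA_parse rest [] [d] := by
      conv_lhs => rw [csA_parse]
      split_ifs <;> simp_all
    have htok : csA_parse (d :: rest) [] [] = tokensOf [d] rest := by
      rw [hstep, csA_parse_eq_tokensOf rest [] [d] (by simp)]
      simp
    have hflat : (csA_parse (d :: rest) [] []).flatten = d :: rest := by
      simpa using csA_parse_flatten (d :: rest) [] []
    rw [htok] at hflat
    simp only [htok, hflat, if_pos, csA_res_tokensOf]

def cs_tag_to_cigar_raises : Claim_raises_cs_tag_to_cigar := by
  unfold Claim_raises_cs_tag_to_cigar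
  constructor
  · intro tag _ hr hpre
    exact hpre.1 (by rw [hr]; rfl)
  · exact ⟨by decide, rfl, rfl⟩
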